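-- pv_equiv track=rewrite | github.com/chebroluharika/CICD-Analysis | FASTAPI_BACKEND/main.py | extract_metadata_from_path
-- ===== SOURCE A (Python) =====
-- def extract_metadata_from_path(path):
--     parts = path.split('/')
--     ibm_version = parts[1] if len(parts) > 1 else "Unknown"
--     rh_build = parts[-2] if len(parts) > 2 else "Unknown"
--     distro = next((p for p in parts if p.lower().startswith('rhel-')), "Unknown").upper()
--     test_type = 'Sanity' if 'Sanity' in parts else 'Regression'
--     return {
--         "ibm_version": ibm_version,
--         "rh_build": rh_build,
--         "distro": distro,
--         "test_type": test_type
--     }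
-- ===== SOURCE B (Python) =====
-- def extract_metadata_from_path(path):
--     # Streaming single pass over the characters: never builds the list of parts.
--     distro = None      # first token whose lowercase starts with 'rhel-'
--     sanity = False     # some token equals 'Sanity'
--     count = 0          # number of completed tokens
--     second = None      # token at index 1
--     last = None        # most recently completed token
--     before_last = None # token completed just before `last`
--     cur = ""
--     for ch in path + '/':            # trailing '/' finalizes the last token
--         if ch == '/':
--             if count == 1:
--                 second = cur
--             if distro is None and cur.lower().startswith('rhel-'):
--                 distro = cur
--             if cur == 'Sanity':
--                 sanity = True
--             before_last = last
--             last = cur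
--             count += 1
--             cur = ""
--         else:
--             cur += ch
--     return {
--         "ibm_version": second if count > 1 else "Unknown",
--         "rh_build": before_last if count > 2 else "Unknown",
--         "distro": (distro if distro is not None else "Unknown").upper(),
--         "test_type": "Sanity" if sanity else "Regression",
--     }
-- ===== Notes on version B (the rewrite author's own statement) =====
-- stated objective: alternative
-- what changed: A splits the path into a list of parts and then indexes and searches that list (next() generator, membership test); B never builds the parts list: it is a streaming parser that walks the characters once, finalizing a token at each '/' and maintaining the token count, the token at index 1, the last two completed tokens, the first 'rhel-' token and a Sanity flag in O(1) extra state.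
import Mathlib
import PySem

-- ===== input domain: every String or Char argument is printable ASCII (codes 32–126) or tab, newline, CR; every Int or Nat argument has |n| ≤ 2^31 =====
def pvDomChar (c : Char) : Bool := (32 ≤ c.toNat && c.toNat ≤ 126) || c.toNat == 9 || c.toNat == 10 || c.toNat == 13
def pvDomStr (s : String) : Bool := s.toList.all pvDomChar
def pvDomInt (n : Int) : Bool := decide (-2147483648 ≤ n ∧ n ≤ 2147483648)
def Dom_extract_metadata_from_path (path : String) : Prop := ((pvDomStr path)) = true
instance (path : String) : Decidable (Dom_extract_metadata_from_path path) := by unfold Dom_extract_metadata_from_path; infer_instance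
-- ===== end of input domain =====

-- B replaces A's split-then-scan (build the parts list, index it, search it twice) by a streaming
-- one-character-at-a-time parser that never materialises the list of parts; objective: alternative.

-- ===== PORT A =====
def extract_metadata_from_path (path : String) : List (String × String) :=
  let parts := (PySem.Str.split? path "/").getD []
  let ibm_version := if parts.length > 1 then PySem.List.pyGetD parts 1 "Unknown" else "Unknown"
  let rh_build := if parts.length > 2 then PySem.List.pyGetD parts (-2) "Unknown" else "Unknown"
  let distro := PySem.Str.upper
    ((parts.find? (fun p => PySem.Str.startswith (PySem.Str.lower p) "rhel-")).getD "Unknown")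
  let test_type := if parts.contains "Sanity" then "Sanity" else "Regression"
  [("ibm_version", ibm_version), ("rh_build", rh_build),
   ("distro", distro), ("test_type", test_type)]

-- ===== PORT B =====
-- state of the streaming parser (tokens kept as List Char, the port's form of Python str fields)
structure PvSt where
  distro : Option (List Char)
  sanity : Bool
  count : Nat
  second : Option (List Char)
  lastTok : Option (List Char)
  beforeLast : Option (List Char)
  cur : List Char
deriving Repr, DecidableEq

-- the body of the `if ch == '/'` branch: finalize the current token
def pvFinal (st : PvSt) : PvSt :=
  { distro := if st.distro.isNone && PySem.Chars.startswith (PySem.Chars.lower st.cur) ("rhel-".toList)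
              then some st.cur else st.distro,
    sanity := st.sanity || (st.cur == "Sanity".toList),
    count := st.count + 1,
    second := if st.count = 1 then some st.cur else st.second,
    lastTok := some st.cur,
    beforeLast := st.lastTok,
    cur := [] }

def pvStep (st : PvSt) (c : Char) : PvSt :=
  if c = '/' then pvFinal st else { st with cur := st.cur ++ [c] }

-- `second if count > 1 else "Unknown"` etc.: the Option is some whenever the guard holds, so
-- .getD is the faithful totalization of reading the Python variable.
def extract_metadata_from_path_alt (path : String) : List (String × String) :=
  let st := (path.toList ++ ['/']).foldl pvStep ⟨none, false, 0, none, none, none, []⟩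
  [("ibm_version", if st.count > 1 then String.ofList (st.second.getD "Unknown".toList) else "Unknown"),
   ("rh_build", if st.count > 2 then String.ofList (st.beforeLast.getD "Unknown".toList) else "Unknown"),
   ("distro", String.ofList (PySem.Chars.upper (st.distro.getD "Unknown".toList))),
   ("test_type", if st.sanity then "Sanity" else "Regression")]

-- ===== PRECONDITION & SPEC =====
def Spec_extract_metadata_from_path (path : String) (out : List (String × String)) : Prop := out = extract_metadata_from_path_alt path
instance (path : String) (out : List (String × String)) : Decidable (Spec_extract_metadata_from_path path out) := by unfold Spec_extract_metadata_from_path; infer_instance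

-- ===== CLAIM (what is proved, stated in full; the proofs are below) =====
def Claim_equal_extract_metadata_from_path : Prop := ∀ (path : String), Dom_extract_metadata_from_path path → Spec_extract_metadata_from_path path (extract_metadata_from_path path)

-- ===== LEMMAS AND PROOFS =====

-- the go-accumulator prepends
theorem pvGo_acc (sep : List Char) (fuel : Nat) (l cur : List Char) (acc : List (List Char)) :
    PySem.Chars.splitOn.go sep fuel l cur acc
      = acc.reverse ++ PySem.Chars.splitOn.go sep fuel l cur [] := by
  induction fuel generalizing l cur acc with
  | zero => simp [PySem.Chars.splitOn.go]
  | succ fuel ih =>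
      cases l with
      | nil => simp [PySem.Chars.splitOn.go]
      | cons c rest =>
          simp only [PySem.Chars.splitOn.go]
          split_ifs with h
          · rw [ih _ _ (cur.reverse :: acc), ih _ _ [cur.reverse]]
            simp
          · rw [ih _ _ acc]

-- the running current token prefixes the first emitted token
theorem pvGo_cur (sep : List Char) (fuel : Nat) (l cur : List Char) :
    PySem.Chars.splitOn.go sep fuel l cur []
      = List.modifyHead (cur.reverse ++ ·) (PySem.Chars.splitOn.go sep fuel l [] []) := by
  induction fuel generalizing l cur with
  | zero => simp [PySem.Chars.splitOn.go]
  | succ fuel ih =>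
      cases l with
      | nil => simp [PySem.Chars.splitOn.go]
      | cons c rest =>
          simp only [PySem.Chars.splitOn.go]
          split_ifs with h
          · simp only [List.reverse_nil]
            rw [pvGo_acc _ _ _ _ [cur.reverse], pvGo_acc _ _ _ _ [([] : List Char)]]
            simp
          · rw [ih rest (c :: cur), ih rest [c], List.modifyHead_modifyHead]
            simp [Function.comp_def]

theorem pvGo_ne_nil (sep : List Char) (fuel : Nat) (l cur : List Char) :
    PySem.Chars.splitOn.go sep fuel l cur [] ≠ [] := by
  cases fuel with
  | zero => simp [PySem.Chars.splitOn.go]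
  | succ fuel =>
      cases l with
      | nil => simp [PySem.Chars.splitOn.go]
      | cons c rest =>
          simp only [PySem.Chars.splitOn.go]
          split_ifs with h
          · rw [pvGo_acc _ _ _ _ [cur.reverse]]; simp
          · rw [pvGo_cur]
            intro hn
            exact pvGo_ne_nil sep fuel rest [] (by simpa using hn)

theorem pvSplit_ne_nil (cs : List Char) : PySem.Chars.splitOn cs ['/'] ≠ [] := by
  unfold PySem.Chars.splitOn; exact pvGo_ne_nil _ _ _ _

theorem pvSplit_slash (cs : List Char) :
    PySem.Chars.splitOn ('/' :: cs) ['/'] = [] :: PySem.Chars.splitOn cs ['/'] := by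
  unfold PySem.Chars.splitOn
  simp only [List.length_cons]
  rw [show cs.length + 1 + 1 = cs.length + 2 from rfl]
  simp only [PySem.Chars.splitOn.go]
  rw [if_pos (by simp)]
  simp only [List.reverse_nil, List.length_cons, List.drop_succ_cons]
  rw [pvGo_acc _ _ _ _ [[]]]
  simp

theorem pvSplit_cons (c : Char) (cs : List Char) (h : c ≠ '/') :
    PySem.Chars.splitOn (c :: cs) ['/'] = List.modifyHead (c :: ·) (PySem.Chars.splitOn cs ['/']) := by
  unfold PySem.Chars.splitOn
  simp only [List.length_cons]
  rw [show cs.length + 1 + 1 = cs.length + 2 from rfl]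
  simp only [PySem.Chars.splitOn.go]
  rw [if_neg (by simp [Ne.symm h])]
  rw [pvGo_cur]
  rfl

-- one finalized part at a time
def pvG (st : PvSt) (p : List Char) : PvSt := pvFinal { st with cur := st.cur ++ p }

-- the char-by-char scan equals a part-by-part fold over splitOn
theorem pvScan_eq_parts (cs : List Char) (st : PvSt) :
    (cs ++ ['/']).foldl pvStep st = (PySem.Chars.splitOn cs ['/']).foldl pvG st := by
  induction cs generalizing st with
  | nil =>
      simp [PySem.Chars.splitOn, PySem.Chars.splitOn.go, pvStep, pvG]
  | cons c rest ih =>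
      by_cases h : c = '/'
      · subst h
        rw [pvSplit_slash]
        simp only [List.cons_append, List.foldl_cons, pvStep]
        rw [ih]
        congr 1
        simp [pvG, pvFinal]
      · rcases hne : PySem.Chars.splitOn rest ['/'] with _ | ⟨p, ps⟩
        · exact absurd hne (pvSplit_ne_nil rest)
        · rw [pvSplit_cons c rest h]
          simp only [List.cons_append, List.foldl_cons, pvStep, if_neg h, hne,
            List.modifyHead_cons, List.foldl_cons]
          rw [ih]
          rw [hne]
          simp only [List.foldl_cons]
          congr 1
          simp [pvG]

def pvPred (p : List Char) : Bool := PySem.Chars.startswith (PySem.Chars.lower p) ("rhel-".toList)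

-- projections of the part fold
theorem pv_cur (parts : List (List Char)) (st : PvSt) (h : st.cur = []) :
    (parts.foldl pvG st).cur = [] := by
  induction parts using List.reverseRecOn with
  | nil => exact h
  | append_singleton xs x ih => rw [List.foldl_concat]; rfl

theorem pv_count (parts : List (List Char)) (st : PvSt) :
    (parts.foldl pvG st).count = st.count + parts.length := by
  induction parts using List.reverseRecOn with
  | nil => rfl
  | append_singleton xs x ih =>
      rw [List.foldl_concat]
      show (xs.foldl pvG st).count + 1 = _
      rw [ih]; simp; omega

theorem pv_distro (parts : List (List Char)) (st : PvSt) (h : st.cur = []) :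
    (parts.foldl pvG st).distro = st.distro.or (parts.find? pvPred) := by
  induction parts using List.reverseRecOn with
  | nil => simp
  | append_singleton xs x ih =>
      rw [List.foldl_concat, List.find?_append]
      show (if ((xs.foldl pvG st).distro).isNone
              && PySem.Chars.startswith (PySem.Chars.lower ((xs.foldl pvG st).cur ++ x)) ("rhel-".toList)
            then some ((xs.foldl pvG st).cur ++ x) else (xs.foldl pvG st).distro) = _
      rw [pv_cur xs st h, ih]
      simp only [List.nil_append]
      rw [← Option.or_assoc]
      rcases hd : st.distro.or (xs.find? pvPred) with _ | d
      · simp only [Option.isNone_none, Bool.true_and, Option.none_or]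
        simp only [List.find?, pvPred]
        cases PySem.Chars.startswith (PySem.Chars.lower x) ("rhel-".toList) <;> rfl
      · simp

theorem pv_sanity (parts : List (List Char)) (st : PvSt) (h : st.cur = []) :
    (parts.foldl pvG st).sanity = (st.sanity || parts.contains ("Sanity".toList)) := by
  induction parts using List.reverseRecOn with
  | nil => simp
  | append_singleton xs x ih =>
      rw [List.foldl_concat]
      show ((xs.foldl pvG st).sanity || ((xs.foldl pvG st).cur ++ x == "Sanity".toList)) = _
      rw [pv_cur xs st h, ih]
      simp only [List.nil_append, List.contains_append, Bool.or_assoc]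
      congr 1
      congr 1
      simp [beq_eq_decide, eq_comm]

theorem pv_second (parts : List (List Char)) (st : PvSt) (hc : st.count = 0) (h : st.cur = []) :
    (parts.foldl pvG st).second = (parts[1]?).or st.second := by
  induction parts using List.reverseRecOn with
  | nil => simp
  | append_singleton xs x ih =>
      rw [List.foldl_concat]
      show (if (xs.foldl pvG st).count = 1 then some ((xs.foldl pvG st).cur ++ x)
            else (xs.foldl pvG st).second) = _
      rw [pv_count xs st, hc, pv_cur xs st h, ih]
      rcases xs with _ | ⟨a, _ | ⟨b, t⟩⟩
      · simp
      · simp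
      · rw [if_neg (by simp)]
        simp

theorem pv_lastTok (parts : List (List Char)) (st : PvSt) (h : st.cur = []) :
    (parts.foldl pvG st).lastTok = (parts.getLast?).or st.lastTok := by
  induction parts using List.reverseRecOn with
  | nil => simp
  | append_singleton xs x ih =>
      rw [List.foldl_concat, List.getLast?_concat]
      show some ((xs.foldl pvG st).cur ++ x) = _
      rw [pv_cur xs st h]; rfl

theorem pv_beforeLast (parts : List (List Char)) (st : PvSt) (h : st.cur = [])
    (h2 : 2 ≤ parts.length) :
    (parts.foldl pvG st).beforeLast = parts[parts.length - 2]? := by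
  induction parts using List.reverseRecOn with
  | nil => simp at h2
  | append_singleton xs x ih =>
      rw [List.foldl_concat]
      show (xs.foldl pvG st).lastTok = _
      rw [pv_lastTok xs st h]
      have hxs : xs ≠ [] := by
        intro hn; subst hn; simp at h2
      rw [List.getLast?_eq_getElem? ]
      have hlen : (xs ++ [x]).length - 2 = xs.length - 1 := by simp
      rw [hlen]
      have hlt : xs.length - 1 < xs.length := by
        have := List.length_pos_iff.mpr hxs; omega
      rw [List.getElem?_append_left hlt]
      rcases hx : xs[xs.length - 1]? with _ | v
      · rw [List.getElem?_eq_none_iff] at hx; omega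
      · simp

theorem pvGetD_one (parts : List String) :
    PySem.List.pyGetD parts 1 "Unknown" = parts.getD 1 "Unknown" := by
  have h : (1 : Int) = ((1 : Nat) : Int) := rfl
  rw [h, PySem.List.pyGetD_natCast]

theorem pvGetD_neg (parts : List String) (h : parts.length > 2) :
    PySem.List.pyGetD parts (-2) "Unknown" = parts.getD (parts.length - 2) "Unknown" := by
  rw [PySem.List.pyGetD_neg_ofNat parts 2 "Unknown" (by omega) (by omega)]
  have h2 : parts.length - 2 < parts.length := by omega
  simp [List.getD, List.getElem?_eq_getElem h2]

theorem pv_contains_map (l : List (List Char)) (s : String) :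
    (l.map String.ofList).contains s = l.contains s.toList := by
  induction l with
  | nil => rfl
  | cons x t ih =>
    simp only [List.map_cons, List.contains_cons, ih]
    congr 1
    simp only [beq_eq_decide]
    congr 1
    simp only [eq_iff_iff]
    constructor
    · intro h; subst h; simp
    · intro h; exact String.toList_inj.mp (by simpa using h)

theorem pv_pred_comp :
    ((fun p => PySem.Str.startswith (PySem.Str.lower p) "rhel-") ∘ String.ofList) = pvPred := by
  funext l
  simp [pvPred, PySem.Str.startswith_eq, PySem.Str.toList_lower]

theorem pv_upper_ofList (l : List Char) :
    PySem.Str.upper (String.ofList l) = String.ofList (PySem.Chars.upper l) := by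
  apply String.toList_inj.mp
  simp [PySem.Str.toList_upper]

-- ===== VERDICT (by name: the statement is the Claim_ definition above) =====
theorem extract_metadata_from_path_spec : Claim_equal_extract_metadata_from_path := by
  intro path _
  unfold Spec_extract_metadata_from_path
  unfold extract_metadata_from_path extract_metadata_from_path_alt
  have hsplit : (PySem.Str.split? path "/").getD []
      = (PySem.Chars.splitOn path.toList ['/']).map String.ofList := by
    simp [PySem.Str.split?, PySem.Chars.split?]
  have hscan := pvScan_eq_parts path.toList (⟨none, false, 0, none, none, none, []⟩ : PvSt)
  simp only [hsplit, hscan]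
  set partsL := PySem.Chars.splitOn path.toList ['/'] with hP
  simp only [List.cons.injEq, Prod.mk.injEq, true_and, and_true, List.length_map]
  refine ⟨?_, ?_, ?_, ?_⟩
  · -- ibm_version
    rw [pv_count, pv_second _ _ rfl rfl]
    simp only [Nat.zero_add, Option.or_none]
    by_cases h1 : partsL.length > 1
    · rw [if_pos h1, if_pos (by simpa using h1), pvGetD_one]
      have hlt : 1 < partsL.length := h1
      rw [List.getElem?_eq_getElem hlt]
      simp [List.getD, List.getElem?_eq_getElem hlt]
    · rw [if_neg h1, if_neg (by simpa using h1)]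
  · -- rh_build
    rw [pv_count]
    simp only [Nat.zero_add]
    by_cases h2 : partsL.length > 2
    · rw [if_pos h2, if_pos (by simpa using h2)]
      rw [pv_beforeLast _ _ rfl (by omega)]
      rw [pvGetD_neg _ (by simpa using h2)]
      have hlt : partsL.length - 2 < partsL.length := by omega
      rw [List.getElem?_eq_getElem hlt]
      simp [List.getD, List.getElem?_eq_getElem hlt]
    · rw [if_neg h2, if_neg (by simpa using h2)]
  · -- distro
    rw [pv_distro _ _ rfl]
    simp only [Option.none_or]
    rw [List.find?_map, pv_pred_comp]
    rcases hd : partsL.find? pvPred with _ | d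
    · simp only [Option.getD_none]
      apply String.toList_inj.mp
      simp [PySem.Str.toList_upper]
    · simp [pv_upper_ofList]
  · -- test_type
    rw [pv_sanity _ _ rfl]
    simp only [Bool.false_or]
    rw [pv_contains_map]
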